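-- pv_equiv track=rewrite | github.com/svella9/Advanced-Algorithms | StringMatching/assign.py | build_lcp
-- ===== SOURCE A (Python) =====
-- def build_lcp(text,suffixArr):
-- 	n = len(suffixArr)
-- 	lcp = [0]
-- 	for i in range(1,n):
-- 		s1 = text[suffixArr[i-1]:]
-- 		s2 = text[suffixArr[i]:]
-- 		k = 0
-- 		m = min(len(s1),len(s2))
-- 		for j in range(m+1):
-- 			if j<m and s1[j] == s2[j]:
-- 				k+=1
-- 			else:
-- 				lcp.append(k)
-- 				break
-- 	return lcp
-- ===== SOURCE B (Python) =====
-- def build_lcp(text, suffixArr):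
--     lcp = [0]
--     for a, b in zip(suffixArr, suffixArr[1:]):
--         s1, s2 = text[a:], text[b:]
--         m = min(len(s1), len(s2))
--         k, c = 0, 1
--         while k < m:
--             d = min(c, m - k)
--             if s1[k:k+d] == s2[k:k+d]:
--                 k += d
--                 c *= 2
--             elif d == 1:
--                 break
--             else:
--                 c //= 2
--         lcp.append(k)
--     return lcp
-- ===== Notes on version B (the rewrite author's own statement) =====
-- stated objective: faster
-- what changed: B walks consecutive pairs with zip and finds each common prefix length by a galloping search over slice-equality tests (chunk size doubles on success, halves on failure) instead of A's index-based character-by-character scan.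
import Mathlib
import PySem

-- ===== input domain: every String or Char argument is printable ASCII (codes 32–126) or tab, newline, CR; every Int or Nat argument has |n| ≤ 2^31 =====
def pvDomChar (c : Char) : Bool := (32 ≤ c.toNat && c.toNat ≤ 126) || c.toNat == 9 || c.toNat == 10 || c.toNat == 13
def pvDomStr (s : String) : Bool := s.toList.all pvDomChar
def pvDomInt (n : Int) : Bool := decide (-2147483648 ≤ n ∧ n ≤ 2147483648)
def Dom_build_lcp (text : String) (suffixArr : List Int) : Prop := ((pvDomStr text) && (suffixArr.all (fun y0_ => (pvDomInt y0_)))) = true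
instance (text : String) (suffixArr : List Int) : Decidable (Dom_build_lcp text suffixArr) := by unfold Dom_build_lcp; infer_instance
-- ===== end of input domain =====

-- ===== PORT A =====
-- B replaces A's character-by-character scan of each adjacent suffix pair by a
-- galloping search over slice-equality tests (objective: faster, constant-factor).

-- inner 'for j in range(m+1)' loop of A: counts matching chars, 'break' appends k;
-- none = loop finished without break (never happens; kept for faithfulness)
def buildLcpInnerA (s1 s2 : List Char) (m : Nat) : Nat → Nat → Int → Option Int
  | 0, _, _ => none
  | fuel+1, j, k =>
    if j < m ∧ PySem.List.pyGet? s1 (j : Int) = PySem.List.pyGet? s2 (j : Int) then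
      buildLcpInnerA s1 s2 m fuel (j+1) (k+1)
    else some k

-- one iteration of A's outer 'for i in range(1,n)' loop
def aStep (t : List Char) (suffixArr : List Int) (lcp : List Int) (i : Int) : List Int :=
  let s1 := PySem.List.slice t (some (PySem.List.pyGetD suffixArr (i-1) 0)) none
  let s2 := PySem.List.slice t (some (PySem.List.pyGetD suffixArr i 0)) none
  let m := min s1.length s2.length
  match buildLcpInnerA s1 s2 m (m+1) 0 0 with
  | some k => lcp ++ [k]
  | none => lcp

def build_lcp (text : String) (suffixArr : List Int) : List Int :=
  (PySem.List.pyRange 1 (PySem.List.len suffixArr)).foldl (aStep text.toList suffixArr) [0]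

-- ===== PORT B =====
-- B's galloping 'while k < m' loop: grow/shrink chunk size c, advance k by a chunk
-- only when the two slices s1[k:k+d], s2[k:k+d] are equal; fuel is a pure totality
-- device (2*m+2 steps always suffice, proved in gallop_eq_cpl below)
def gallop (s1 s2 : List Char) (m : Nat) : Nat → Nat → Nat → Int
  | 0, k, _ => (k : Int)
  | fuel+1, k, c =>
    if k < m then
      if PySem.List.slice s1 (some ((k : Nat) : Int)) (some ((k + min c (m-k) : Nat) : Int))
         = PySem.List.slice s2 (some ((k : Nat) : Int)) (some ((k + min c (m-k) : Nat) : Int)) then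
        gallop s1 s2 m fuel (k + min c (m-k)) (c*2)
      else if min c (m-k) = 1 then (k : Int)
      else gallop s1 s2 m fuel k (c/2)
    else (k : Int)

-- one iteration of B's 'for a, b in zip(suffixArr, suffixArr[1:])' loop
def bStep (t : List Char) (lcp : List Int) (p : Int × Int) : List Int :=
  let s1 := PySem.List.slice t (some p.1) none
  let s2 := PySem.List.slice t (some p.2) none
  let m := min s1.length s2.length
  lcp ++ [gallop s1 s2 m (2*m+2) 0 1]

def build_lcp_alt (text : String) (suffixArr : List Int) : List Int :=
  ((suffixArr.zip (PySem.List.slice suffixArr (some 1) none)).foldl (bStep text.toList) [0])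

-- ===== PRECONDITION & SPEC =====
def Spec_build_lcp (text : String) (suffixArr : List Int) (out : List Int) : Prop := out = build_lcp_alt text suffixArr
instance (text : String) (suffixArr : List Int) (out : List Int) : Decidable (Spec_build_lcp text suffixArr out) := by unfold Spec_build_lcp; infer_instance

-- ===== CLAIM (what is proved, stated in full; the proofs are below) =====
def Claim_equal_build_lcp : Prop := ∀ (text : String) (suffixArr : List Int), Dom_build_lcp text suffixArr → Spec_build_lcp text suffixArr (build_lcp text suffixArr)

-- ===== LEMMAS AND PROOFS =====

-- common prefix length of two suffixes (proof-side characterisation)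
def cpl : List Char → List Char → Int
  | a :: as, b :: bs => if a = b then 1 + cpl as bs else 0
  | _, _ => 0

lemma cpl_nil_right (x : List Char) : cpl x [] = 0 := by
  cases x <;> simp [cpl]

lemma cpl_nil_left (x : List Char) : cpl [] x = 0 := by
  cases x <;> simp [cpl]

lemma cpl_nonneg (a : List Char) : ∀ (b : List Char), 0 ≤ cpl a b := by
  induction a with
  | nil => intro b; cases b <;> simp [cpl]
  | cons x as ih =>
    intro b
    cases b with
    | nil => simp [cpl]
    | cons y bs => have := ih bs; simp only [cpl]; split_ifs <;> omega

lemma cpl_le_min (a : List Char) : ∀ (b : List Char), cpl a b ≤ min a.length b.length := by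
  induction a with
  | nil => intro b; cases b <;> simp [cpl]
  | cons x as ih =>
    intro b
    cases b with
    | nil => simp [cpl]
    | cons y bs =>
      have := ih bs
      simp only [cpl, List.length_cons]
      split_ifs <;> push_cast <;> omega

-- j ≤ cpl a b means exactly: both lists reach j and their first j characters agree
lemma cpl_ge_iff (j : Nat) : ∀ (a b : List Char),
    ((j : Int) ≤ cpl a b) ↔ (j ≤ a.length ∧ j ≤ b.length ∧ a.take j = b.take j) := by
  induction j with
  | zero => intro a b; simpa using cpl_nonneg a b
  | succ j ih =>
    intro a b
    match a, b with
    | [], _ => rw [cpl_nil_left]; simp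
    | _ :: _, [] => rw [cpl_nil_right]; simp
    | x :: as, y :: bs =>
      by_cases hxy : x = y
      · subst hxy
        rw [show cpl (x :: as) (x :: bs) = 1 + cpl as bs from by simp [cpl]]
        simp only [List.take_succ_cons, List.length_cons]
        rw [show ((j+1 : Nat) : Int) ≤ 1 + cpl as bs ↔ ((j : Nat) : Int) ≤ cpl as bs from by push_cast; omega]
        rw [ih as bs]
        simp only [List.cons.injEq, true_and]
        constructor
        · rintro ⟨h1, h2, h3⟩; exact ⟨by omega, by omega, h3⟩
        · rintro ⟨h1, h2, h3⟩; exact ⟨by omega, by omega, h3⟩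
      · simp only [cpl, if_neg hxy, List.take_succ_cons, List.cons.injEq]
        constructor
        · intro h; exfalso; push_cast at h; omega
        · rintro ⟨-, -, hx, -⟩; exact absurd hx hxy

-- chunk test: given the first k characters agree, the next d agree iff k+d ≤ cpl
lemma chunk_iff (a b : List Char) (k d : Nat)
    (hk : (k : Int) ≤ cpl a b) (ha : k + d ≤ a.length) (hb : k + d ≤ b.length) :
    ((a.drop k).take d = (b.drop k).take d) ↔ ((k + d : Nat) : Int) ≤ cpl a b := by
  have htk : a.take k = b.take k := ((cpl_ge_iff k a b).mp hk).2.2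
  rw [cpl_ge_iff]
  constructor
  · intro h
    exact ⟨ha, hb, by rw [List.take_add, List.take_add, htk, h]⟩
  · rintro ⟨-, -, h⟩
    rw [List.take_add, List.take_add, htk] at h
    exact List.append_cancel_left h

lemma log2_double (c : Nat) (hc : 1 ≤ c) : Nat.log 2 (c*2) = Nat.log 2 c + 1 :=
  Nat.log_mul_base (by omega) (by omega)

-- B's galloping loop computes the common prefix length of the two suffixes
lemma gallop_eq_cpl (s1 s2 : List Char) :
    ∀ (fuel k c : Nat), 1 ≤ c → (k : Int) ≤ cpl s1 s2 →
      2 * (min s1.length s2.length - k) + Nat.log 2 c + 1 ≤ fuel →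
      gallop s1 s2 (min s1.length s2.length) fuel k c = cpl s1 s2 := by
  set m := min s1.length s2.length with hm
  have hcle := cpl_le_min s1 s2
  have hchunk : ∀ (k d : Nat), (k : Int) ≤ cpl s1 s2 → k + d ≤ m →
      ((PySem.List.slice s1 (some ((k : Nat) : Int)) (some ((k+d : Nat) : Int))
        = PySem.List.slice s2 (some ((k : Nat) : Int)) (some ((k+d : Nat) : Int)))
       ↔ ((k + d : Nat) : Int) ≤ cpl s1 s2) := by
    intro k d hk hkd
    rw [PySem.List.slice_natCast, PySem.List.slice_natCast, Nat.add_sub_cancel_left]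
    exact chunk_iff _ _ k d hk (by omega) (by omega)
  intro fuel
  induction fuel with
  | zero => intro k c hc1 hk hf; omega
  | succ fuel ih =>
    intro k c hc1 hk hf
    by_cases hkm : k < m
    · rw [gallop]
      simp only [if_pos hkm]
      by_cases heq : PySem.List.slice s1 (some ((k : Nat) : Int))
            (some ((k + min c (m-k) : Nat) : Int))
          = PySem.List.slice s2 (some ((k : Nat) : Int))
            (some ((k + min c (m-k) : Nat) : Int))
      · rw [if_pos heq]
        have hkd := (hchunk k (min c (m-k)) hk (by omega)).mp heq
        have hlog := log2_double c hc1
        exact ih _ _ (by omega) hkd (by omega)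
      · rw [if_neg heq]
        have hnkd : ¬ ((k + min c (m-k) : Nat) : Int) ≤ cpl s1 s2 :=
          fun h => heq ((hchunk k (min c (m-k)) hk (by omega)).mpr h)
        by_cases hd1 : min c (m-k) = 1
        · rw [if_pos hd1]
          rw [hd1] at hnkd
          push_cast at hnkd hk ⊢
          omega
        · rw [if_neg hd1]
          have hc2 : 2 ≤ c := by omega
          have hlog : Nat.log 2 (c/2) = Nat.log 2 c - 1 := Nat.log_div_base 2 c
          have hl1 : 1 ≤ Nat.log 2 c := Nat.log_pos (by omega) hc2
          exact ih _ _ (by omega) hk (by omega)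
    · rw [gallop]
      simp only [if_neg hkm]
      omega

-- A's inner for-loop always breaks, returning k plus the common prefix length
lemma innerA_eq_cpl (s1 s2 : List Char) :
    ∀ (fuel j : Nat) (k : Int), j ≤ min s1.length s2.length →
      min s1.length s2.length + 1 - j ≤ fuel →
      buildLcpInnerA s1 s2 (min s1.length s2.length) fuel j k
        = some (k + cpl (s1.drop j) (s2.drop j)) := by
  intro fuel
  induction fuel with
  | zero => intro j k hj hf; omega
  | succ fuel ih =>
    intro j k hj hf
    set m := min s1.length s2.length with hm
    by_cases hjm : j < m
    · have hj1 : j < s1.length := by omega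
      have hj2 : j < s2.length := by omega
      rw [buildLcpInnerA]
      rw [PySem.List.pyGet?_natCast, PySem.List.pyGet?_natCast,
          List.getElem?_eq_getElem hj1, List.getElem?_eq_getElem hj2]
      by_cases hc : s1[j] = s2[j]
      · rw [if_pos ⟨hjm, by rw [hc]⟩, ih (j+1) (k+1) (by omega) (by omega),
            List.drop_eq_getElem_cons hj1, List.drop_eq_getElem_cons hj2]
        simp only [cpl, if_pos hc]
        ring_nf
      · rw [if_neg (by simp [hc])]
        have e1 : s1.drop j = s1[j] :: s1.drop (j+1) := List.drop_eq_getElem_cons hj1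
        have e2 : s2.drop j = s2[j] :: s2.drop (j+1) := List.drop_eq_getElem_cons hj2
        rw [e1, e2]
        simp [cpl, hc]
    · have hje : j = m := by omega
      rw [buildLcpInnerA, if_neg (by simp [hjm])]
      have : cpl (s1.drop j) (s2.drop j) = 0 := by
        rcases Nat.le_total s1.length s2.length with hmin | hmin
        · have : s1.drop j = [] := List.drop_eq_nil_of_le (by omega)
          rw [this, cpl_nil_left]
        · have : s2.drop j = [] := List.drop_eq_nil_of_le (by omega)
          rw [this, cpl_nil_right]
      rw [this]; ring_nf

-- each outer iteration of A appends the common prefix length of the two suffixes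
lemma aStep_eq (t : List Char) (sa : List Int) (lcp : List Int) (i : Int) :
    aStep t sa lcp i
      = lcp ++ [cpl (PySem.List.slice t (some (PySem.List.pyGetD sa (i-1) 0)) none)
                    (PySem.List.slice t (some (PySem.List.pyGetD sa i 0)) none)] := by
  simp only [aStep]
  rw [innerA_eq_cpl _ _ _ 0 0 (by omega) (by omega)]
  simp

lemma foldl_aStep (t : List Char) (sa : List Int) :
    ∀ (l : List Int) (init : List Int),
      l.foldl (aStep t sa) init
        = init ++ l.map (fun i =>
            cpl (PySem.List.slice t (some (PySem.List.pyGetD sa (i-1) 0)) none)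
                (PySem.List.slice t (some (PySem.List.pyGetD sa i 0)) none)) := by
  intro l
  induction l with
  | nil => simp
  | cons x xs ih =>
    intro init
    rw [List.foldl_cons, aStep_eq, ih, List.map_cons, List.append_assoc,
        List.singleton_append]

-- each iteration of B appends the common prefix length of the two suffixes
lemma bStep_eq (t : List Char) (lcp : List Int) (p : Int × Int) :
    bStep t lcp p
      = lcp ++ [cpl (PySem.List.slice t (some p.1) none)
                    (PySem.List.slice t (some p.2) none)] := by
  simp only [bStep]
  rw [gallop_eq_cpl _ _ _ 0 1 (by omega)
      (by simpa using cpl_nonneg _ _) (by rw [Nat.log_one_right]; omega)]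

lemma foldl_bStep (t : List Char) :
    ∀ (l : List (Int × Int)) (init : List Int),
      l.foldl (bStep t) init
        = init ++ l.map (fun p =>
            cpl (PySem.List.slice t (some p.1) none)
                (PySem.List.slice t (some p.2) none)) := by
  intro l
  induction l with
  | nil => simp
  | cons x xs ih =>
    intro init
    rw [List.foldl_cons, bStep_eq, ih, List.map_cons, List.append_assoc,
        List.singleton_append]

-- pyRange 1 L as a mapped List.range
lemma pyRange_one_natCast (L : Nat) :
    PySem.List.pyRange 1 ((L : Int)) = List.map (fun k : Nat => ((k : Int) + 1)) (List.range (L-1)) := by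
  induction L with
  | zero => decide
  | succ L ih =>
    cases L with
    | zero => decide
    | succ L' =>
      have h : (1 : Int) ≤ ((L' + 1 : Nat) : Int) := by push_cast; omega
      have e : ((L' + 1 + 1 : Nat) : Int) = ((L' + 1 : Nat) : Int) + 1 := by push_cast; ring
      rw [e, PySem.List.pyRange_one_succ_right h, ih]
      have e2 : L' + 1 + 1 - 1 = (L' + 1 - 1) + 1 := by omega
      rw [e2, List.range_succ, List.map_append]
      simp

theorem build_lcp_spec_aux (text : String) (sa : List Int) :
    build_lcp text sa = build_lcp_alt text sa := by
  set t := text.toList with ht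
  set L := sa.length with hL
  unfold build_lcp build_lcp_alt
  rw [show PySem.List.len sa = (L : Int) from by simp [PySem.List.len_eq, hL]]
  rw [PySem.List.slice_from_one, foldl_aStep, foldl_bStep, pyRange_one_natCast,
      List.map_map]
  congr 1
  apply List.ext_getElem
  · simp [List.length_zip]
    omega
  · intro k hk1 hk2
    simp only [List.length_map, List.length_range] at hk1
    have hkL : k + 1 < L := by omega
    simp only [List.getElem_map, List.getElem_range, Function.comp_apply,
               List.getElem_zip, List.getElem_tail]
    have e1 : ((k : Int) + 1 - 1) = ((k : Nat) : Int) := by ring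
    have e2 : ((k : Int) + 1) = (((k+1 : Nat)) : Int) := by push_cast; ring
    rw [e1, e2, PySem.List.pyGetD_natCast, PySem.List.pyGetD_natCast,
        List.getD_eq_getElem _ _ (by omega), List.getD_eq_getElem _ _ (by omega)]

-- ===== VERDICT (by name: the statement is the Claim_ definition above) =====
theorem build_lcp_spec : Claim_equal_build_lcp := by
  intro text sa _
  unfold Spec_build_lcp
  exact build_lcp_spec_aux text sa
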